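-- pv_equiv track=rewrite | github.com/YuxuanZhang588/Python-HW | HW9/hw9.py | recursive_delete
-- ===== SOURCE A (Python) =====
-- def recursive_delete(s,char):
--     """ Deletes specific character in a given string.
--
--     Parameters:
--         s - a string
--         char - some character in the alphabet
--
--     Return:
--         A string that remains after deleting all occurences of some letter
--         from a string.
--
--     Pseudocode:
--         The base case is once there are no characters left in the string,
--         return the modified string.
--         What we want is if the first character of the string equals the
--         character we want to remove, set s = to the remaining string
--         and call the function with the remainder of the string.
--         If the first character does not equal the character we want to remove,
--         return that character of the string and then call the function again
--         with the remainder of the string.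
--         This means once the function has been called enough times, the string
--         will be empty and will return all of the characters of the string that
--         are not equal to the character we want to remove.
--     """
--     #base case
--     if s == '':
--         return s
--     if s[0] == char:
--         s = s[1:]
--         return recursive_delete(s,char)
--     else:
--         return s[0]+recursive_delete(s[1:],char)
-- ===== SOURCE B (Python) =====
-- def recursive_delete(s, char):
--     """Iterative form: scan s once, appending each character that is not char."""
--     result = ''
--     for c in s:
--         if c != char:
--             result = result + c
--     return result
-- ===== Notes on version B (the rewrite author's own statement) =====
-- stated objective: simpler
-- what changed: Replaced head/tail recursion (slicing s[1:] at each step) by a single iterative for-loop with a string accumulator.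
import Mathlib
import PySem

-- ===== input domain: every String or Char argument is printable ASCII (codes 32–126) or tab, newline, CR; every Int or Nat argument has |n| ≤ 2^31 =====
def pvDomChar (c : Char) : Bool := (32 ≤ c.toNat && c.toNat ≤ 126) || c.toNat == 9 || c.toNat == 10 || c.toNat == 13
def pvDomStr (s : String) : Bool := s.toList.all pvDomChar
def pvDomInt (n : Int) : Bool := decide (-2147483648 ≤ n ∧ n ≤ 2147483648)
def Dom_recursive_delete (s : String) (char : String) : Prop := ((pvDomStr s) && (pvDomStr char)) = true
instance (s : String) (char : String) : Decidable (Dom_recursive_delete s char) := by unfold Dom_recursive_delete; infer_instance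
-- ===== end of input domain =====

-- B replaces A's head/tail recursion by a single iterative accumulator loop (objective: simpler).

-- ===== PORT A =====
-- A recurses on the string: if s == '' return s; if s[0] == char recurse on s[1:];
-- else s[0] + recurse on s[1:]. Ported as structural recursion on the character list
-- (s[0] is the one-character string String.ofList [c]).
def recDeleteA : List Char → String → List Char
  | [], _ => []
  | c :: rest, char =>
      if String.ofList [c] == char then recDeleteA rest char
      else c :: recDeleteA rest char

def recursive_delete (s : String) (char : String) : String :=
  String.ofList (recDeleteA s.toList char)

-- ===== PORT B =====
-- B: result = ''; for c in s: if c != char: result = result + c; return result.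
def recursive_delete_alt (s : String) (char : String) : String :=
  String.ofList (s.toList.foldl
    (fun result c => if String.ofList [c] == char then result else result ++ [c]) [])

-- ===== PRECONDITION & SPEC =====
def Spec_recursive_delete (s : String) (char : String) (out : String) : Prop := out = recursive_delete_alt s char
instance (s : String) (char : String) (out : String) : Decidable (Spec_recursive_delete s char out) := by unfold Spec_recursive_delete; infer_instance

-- ===== CLAIM (what is proved, stated in full; the proofs are below) =====
def Claim_equal_recursive_delete : Prop := ∀ (s : String) (char : String), Dom_recursive_delete s char → Spec_recursive_delete s char (recursive_delete s char)

-- ===== LEMMAS AND PROOFS =====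
theorem recDeleteA_foldl (l : List Char) (char : String) (acc : List Char) :
    l.foldl (fun result c => if String.ofList [c] == char then result else result ++ [c]) acc
      = acc ++ recDeleteA l char := by
  induction l generalizing acc with
  | nil => simp [recDeleteA]
  | cons c rest ih =>
      simp only [List.foldl, recDeleteA]
      split <;> rw [ih] <;> simp

-- ===== VERDICT (by name: the statement is the Claim_ definition above) =====
theorem recursive_delete_spec : Claim_equal_recursive_delete := by
  intro s char _
  unfold Spec_recursive_delete recursive_delete recursive_delete_alt
  rw [recDeleteA_foldl]
  rfl
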